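-- pv_equiv track=rewrite | github.com/abdelrahmant-9/Sprint-Health-Score | sprint_health_2.py | _sprint_placement_label
-- ===== SOURCE A (Python) =====
-- def _sprint_placement_label(fields: dict) -> str:
--     sprints = fields.get("customfield_10020") or []
--     if not sprints:
--         return "Backlog"
--     active = [
--         s.get("name", "").strip()
--         for s in sprints
--         if (s.get("state", "") or "").lower() == "active" and s.get("name")
--     ]
--     if active:
--         return active[0]
--     named = [s.get("name", "").strip() for s in sprints if s.get("name")]
--     return named[-1] if named else "Backlog"
-- ===== SOURCE B (Python) =====
-- def _sprint_placement_label(fields: dict) -> str: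
--     # Reverse scan: the last named sprint is the first named one we meet; any
--     # active named sprint met later (i.e. earlier in the list) overwrites it,
--     # so the final value is the FIRST active named sprint when one exists.
--     label = "Backlog"
--     seen_named = False
--     for s in reversed(fields.get("customfield_10020") or []):
--         nm = s.get("name")
--         if not nm:
--             continue
--         if (s.get("state", "") or "").lower() == "active":
--             label = nm.strip()
--             seen_named = True
--         elif not seen_named:
--             label = nm.strip()
--             seen_named = True
--     return label
-- ===== Notes on version B (the rewrite author's own statement) =====
-- stated objective: simpler
-- what changed: B traverses the sprints back-to-front once with a single overwrite-on-active label variable (so the answer is built in the reverse order), instead of materialising two filtered/mapped lists and indexing into them; no empty-list guard is needed.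
import Mathlib
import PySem

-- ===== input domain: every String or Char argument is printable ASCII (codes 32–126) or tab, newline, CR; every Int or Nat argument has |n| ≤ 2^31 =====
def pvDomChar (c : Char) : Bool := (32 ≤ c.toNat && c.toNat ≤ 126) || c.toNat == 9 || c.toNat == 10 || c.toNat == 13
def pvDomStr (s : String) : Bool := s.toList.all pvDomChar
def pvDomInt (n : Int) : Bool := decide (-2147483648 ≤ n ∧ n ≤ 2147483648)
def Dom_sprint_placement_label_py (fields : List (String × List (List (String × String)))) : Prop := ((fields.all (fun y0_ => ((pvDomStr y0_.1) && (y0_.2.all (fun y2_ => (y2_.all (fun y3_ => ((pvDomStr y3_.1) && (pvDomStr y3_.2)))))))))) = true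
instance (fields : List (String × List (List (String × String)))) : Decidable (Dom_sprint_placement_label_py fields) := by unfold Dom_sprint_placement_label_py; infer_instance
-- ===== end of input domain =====

-- B replaces A's two filtered comprehensions by one traversal of the sprints in REVERSE
-- with a single overwrite-on-active label variable; objective: simpler.

-- dict.get(k) on an association list: first match, none = missing (shared dict helper)
def pvGet {α : Type} (d : List (String × α)) (k : String) : Option α :=
  (d.find? (fun p => p.1 == k)).map (·.2)

-- dict.get(k, dflt)
def pvGetD {α : Type} (d : List (String × α)) (k : String) (dflt : α) : α :=
  (pvGet d k).getD dflt

-- ===== PORT A =====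
def sprint_placement_label_py (fields : List (String × List (List (String × String)))) : String :=
  -- sprints = fields.get("customfield_10020") or []  ('or []' only replaces a falsy value, i.e. [] itself)
  let sprints := (pvGet fields "customfield_10020").getD []
  if sprints = [] then "Backlog"
  else
    let active := (sprints.filter (fun s =>
        PySem.Str.lower (pvGetD s "state" "") == "active"
          && !((pvGet s "name").getD "" == ""))).map
      (fun s => PySem.Str.strip (pvGetD s "name" ""))
    match active with
    | a :: _ => a
    | [] =>
      let named := (sprints.filter (fun s => !((pvGet s "name").getD "" == ""))).map
        (fun s => PySem.Str.strip (pvGetD s "name" ""))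
      match named.getLast? with
      | some x => x
      | none => "Backlog"

-- ===== PORT B =====
-- one step of B's reverse loop: state is (label, seen_named)
def pvStepB (acc : String × Bool) (s : List (String × String)) : String × Bool :=
  match pvGet s "name" with
  | none => acc
  | some nm =>
    if nm == "" then acc
    else if PySem.Str.lower (pvGetD s "state" "") == "active" then
      (PySem.Str.strip nm, true)
    else if !acc.2 then (PySem.Str.strip nm, true)
    else acc

def sprint_placement_label_py_alt (fields : List (String × List (List (String × String)))) : String :=
  ((((pvGet fields "customfield_10020").getD []).reverse.foldl pvStepB ("Backlog", false)).1)

-- ===== PRECONDITION & SPEC =====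
def Spec_sprint_placement_label_py (fields : List (String × List (List (String × String)))) (out : String) : Prop := out = sprint_placement_label_py_alt fields
instance (fields : List (String × List (List (String × String)))) (out : String) : Decidable (Spec_sprint_placement_label_py fields out) := by unfold Spec_sprint_placement_label_py; infer_instance

-- ===== CLAIM (what is proved, stated in full; the proofs are below) =====
def Claim_equal_sprint_placement_label_py : Prop := ∀ (fields : List (String × List (List (String × String)))), Dom_sprint_placement_label_py fields → Spec_sprint_placement_label_py fields (sprint_placement_label_py fields)

-- ===== LEMMAS AND PROOFS =====

-- A's predicates and projection, named for the proofs
def pvActP (s : List (String × String)) : Bool :=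
  PySem.Str.lower (pvGetD s "state" "") == "active" && !((pvGet s "name").getD "" == "")
def pvNamP (s : List (String × String)) : Bool := !((pvGet s "name").getD "" == "")
def pvNm (s : List (String × String)) : String := PySem.Str.strip (pvGetD s "name" "")

-- characterisation of B's reverse fold, written as a foldr over the original order:
-- the label is A's first active name if any, else A's last plain name, else "Backlog";
-- seen_named records whether any named sprint exists.
theorem pvFoldr_char (xs : List (List (String × String))) :
    xs.foldr (fun s acc => pvStepB acc s) ("Backlog", false)
      = ((((xs.filter pvActP).map pvNm).head?).getD
           (((((xs.filter pvNamP).map pvNm).getLast?)).getD "Backlog"),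
         (((xs.filter pvNamP).map pvNm).getLast?).isSome) := by
  induction xs with
  | nil => simp
  | cons s xs ih =>
    simp only [List.foldr_cons, ih]
    by_cases hn : (pvGet s "name").getD "" = ""
    · have hstep : ∀ acc, pvStepB acc s = acc := by
        intro acc
        unfold pvStepB
        cases h : pvGet s "name" with
        | none => rfl
        | some v =>
          have : v = "" := by simpa [h] using hn
          simp [this]
      have hA : pvActP s = false := by simp [pvActP, hn]
      have hN : pvNamP s = false := by simp [pvNamP, hn]
      rw [hstep]
      simp [hA, hN]
    · have hN : pvNamP s = true := by simp [pvNamP, hn]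
      have hv : ∃ v, pvGet s "name" = some v ∧ v ≠ "" := by
        cases h : pvGet s "name" with
        | none => simp [h] at hn
        | some v =>
          refine ⟨v, rfl, ?_⟩
          simpa [pvGetD, h] using hn
      obtain ⟨v, hv, hvne⟩ := hv
      have hnm : PySem.Str.strip v = pvNm s := by simp [pvNm, pvGetD, hv]
      have hlast : ∀ l : List String, ((pvNm s :: l).getLast?) = (l.getLast?).or (some (pvNm s)) := by
        intro l
        cases l with
        | nil => simp
        | cons a t =>
          cases h : (a :: t).getLast? with
          | none => simp [List.getLast?_cons] at h
          | some x => simp [List.getLast?_cons] at h ⊢; simp [h]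
      by_cases hs : (PySem.Str.lower (pvGetD s "state" "") == "active") = true
      · -- active named sprint: B overwrites the label unconditionally
        have hA : pvActP s = true := by simp [pvActP, hs, hn]
        have hstep : ∀ acc, pvStepB acc s = (pvNm s, true) := by
          intro acc; unfold pvStepB; simp [hv, hvne, hs, hnm]
        rw [hstep]
        simp [hA, hN, hlast]
      · -- named but not active: B sets the label only if nothing named was seen yet
        have hA : pvActP s = false := by
          simp [pvActP] at hs ⊢; intro h; exact absurd h hs
        have hstep : ∀ acc : String × Bool,
            pvStepB acc s = if acc.2 then acc else (pvNm s, true) := by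
          intro acc; unfold pvStepB
          cases h2 : acc.2 <;> simp [hv, hvne, hs, hnm]
        rw [hstep]
        cases hln : ((xs.filter pvNamP).map pvNm).getLast? with
        | some x => simp [hA, hN, hlast, hln]
        | none =>
          -- no named sprint in xs, hence no active one either
          have hfn : xs.filter pvNamP = [] := by
            cases h : xs.filter pvNamP with
            | nil => rfl
            | cons a t => simp [h, List.getLast?_cons] at hln
          have hfa : xs.filter pvActP = [] := by
            rw [List.filter_eq_nil_iff] at hfn ⊢
            intro a ha
            have := hfn a ha
            simp [pvActP, pvNamP] at this ⊢
            intro _; exact this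
          simp [hA, hN, hlast, hfn, hfa]

-- the whole equality, generalised over the sprint list (stated with the named
-- predicates; A's inlined lambdas are definitionally the same)
theorem pvMain (sprints : List (List (String × String))) :
    (if sprints = [] then "Backlog"
     else match (sprints.filter pvActP).map pvNm with
       | a :: _ => a
       | [] =>
         match ((sprints.filter pvNamP).map pvNm).getLast? with
         | some x => x
         | none => "Backlog")
    = (sprints.reverse.foldl pvStepB ("Backlog", false)).1 := by
  rw [List.foldl_reverse]
  rw [show (List.foldr (fun x y => pvStepB y x) (("Backlog", false) : String × Bool) sprints)
      = sprints.foldr (fun s acc => pvStepB acc s) ("Backlog", false) from rfl]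
  rw [pvFoldr_char sprints]
  by_cases h : sprints = []
  · subst h; simp
  · rw [if_neg h]
    cases hact : (sprints.filter pvActP).map pvNm with
    | cons a t => rfl
    | nil =>
      cases hl : ((sprints.filter pvNamP).map pvNm).getLast? with
      | some x => rfl
      | none => rfl

-- ===== VERDICT (by name: the statement is the Claim_ definition above) =====
theorem sprint_placement_label_py_spec : Claim_equal_sprint_placement_label_py := by
  intro fields _
  show sprint_placement_label_py fields = sprint_placement_label_py_alt fields
  exact pvMain ((pvGet fields "customfield_10020").getD [])
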